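-- pv_equiv track=rewrite | github.com/NerdPractitioner/Portland-State-University-Projects | midtester.py | sum_special
-- ===== SOURCE A (Python) =====
-- def is_special(x):
--     """ is_special takes an integer x and returns a boolean
--     indicating if this is a 'special' number"""
--     return ((3)&x)==3
--
-- def sum_special(start,stop):
--     """ sum_special takes an integer `start` and an integer `stop`
--         and returns the sum of all special numbers between `start`
--         and `stop`
--
-- >>> sum_special(0,3)
-- 0
-- >>> sum_special(3,4)
-- 3
-- >>> sum_special(4,4)
-- 0
-- >>> sum_special(0,10)
-- 10
-- >>> sum_special(5,10)
-- 7
-- >>> sum_special(50,100)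
-- 975
-- >>> sum_special(100,1000)
-- 123975
-- >>> sum_special(10000,1000)
-- 0
--
--
--
--     """
--     marker = start
--     suma = 0
--     while marker < stop:
--          if is_special(marker):
--               suma += marker
--          marker +=1
--     return suma
-- ===== SOURCE B (Python) =====
-- def sum_special(start, stop):
--     # closed-form: numbers >= start that are "special" ((x & 3) == 3, i.e. x % 4 == 3)
--     # form an arithmetic progression first, first+4, ... below stop.
--     first = start + ((3 - start) % 4)
--     if first >= stop:
--         return 0
--     n = (stop - 1 - first) // 4 + 1
--     return n * first + 2 * n * (n - 1)
-- ===== Notes on version B (the rewrite author's own statement) =====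
-- stated objective: faster
-- what changed: Replaced the element-by-element while loop with a closed-form arithmetic-series formula over the progression of numbers congruent to 3 mod 4 in [start, stop); intended as asymptotically faster (O(1) vs O(stop-start)) — a timing run measured 42.55x at the largest size on long-range inputs, though inputs with stop<=start are O(1) for A too.
import Mathlib
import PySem

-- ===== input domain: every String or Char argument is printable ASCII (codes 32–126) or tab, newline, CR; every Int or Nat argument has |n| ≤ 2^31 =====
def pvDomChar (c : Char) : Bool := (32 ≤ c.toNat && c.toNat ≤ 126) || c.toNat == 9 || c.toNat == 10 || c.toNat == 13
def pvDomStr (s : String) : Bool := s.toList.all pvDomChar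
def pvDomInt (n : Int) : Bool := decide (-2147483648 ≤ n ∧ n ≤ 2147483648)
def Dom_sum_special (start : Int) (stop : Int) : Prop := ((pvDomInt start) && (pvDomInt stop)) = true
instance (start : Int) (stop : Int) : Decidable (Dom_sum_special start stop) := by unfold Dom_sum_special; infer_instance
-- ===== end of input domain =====

-- B replaces A's element-by-element while loop with a closed-form
-- arithmetic-series formula over the special numbers in [start, stop) (intended as faster; probe measured 42.55x at the largest size on long-range inputs).

-- ===== PORT A =====
def is_special (x : Int) : Bool := PySem.Int.band 3 x == 3

def sumSpecialLoop (stop : Int) (marker : Int) (suma : Int) : Int :=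
  if marker < stop then
    sumSpecialLoop stop (marker + 1) (if is_special marker then suma + marker else suma)
  else suma
termination_by (stop - marker).toNat
decreasing_by omega

def sum_special (start : Int) (stop : Int) : Int := sumSpecialLoop stop start 0

-- ===== PORT B =====
def sum_special_alt (start : Int) (stop : Int) : Int :=
  let first := start + PySem.Int.mod (3 - start) 4
  if first ≥ stop then 0
  else
    let n := PySem.Int.floordiv (stop - 1 - first) 4 + 1
    n * first + 2 * n * (n - 1)

-- ===== PRECONDITION & SPEC =====
def Spec_sum_special (start : Int) (stop : Int) (out : Int) : Prop := out = sum_special_alt start stop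
instance (start : Int) (stop : Int) (out : Int) : Decidable (Spec_sum_special start stop out) := by unfold Spec_sum_special; infer_instance

-- ===== CLAIM (what is proved, stated in full; the proofs are below) =====
def Claim_equal_sum_special : Prop := ∀ (start : Int) (stop : Int), Dom_sum_special start stop → Spec_sum_special start stop (sum_special start stop)

-- ===== LEMMAS AND PROOFS =====

-- (3 & x) == 3 in Python is exactly x % 4 == 3
theorem band3_eq_mod4 (x : Int) : PySem.Int.band 3 x = PySem.Int.mod x 4 := by
  have h3 : (3:Nat) = 2^2 - 1 := rfl
  cases x with
  | ofNat n =>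
      simp [PySem.Int.band, PySem.Int.mod, Nat.land_comm 3 n, Int.fmod_eq_emod]
      rw [h3, Nat.and_two_pow_sub_one_eq_mod]
      omega
  | negSucc n =>
      simp [PySem.Int.band, PySem.Int.mod, Nat.land_comm 3 n, Int.fmod_eq_emod, Int.negSucc_eq]
      rw [h3, Nat.and_two_pow_sub_one_eq_mod]
      omega

theorem is_special_iff (x : Int) : is_special x = true ↔ x % 4 = 3 := by
  simp [is_special, band3_eq_mod4, PySem.Int.mod, Int.fmod_eq_emod]

-- B's formula written in plain emod/ediv terms
def altAux (f : Int) (stop : Int) : Int :=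
  if f ≥ stop then 0
  else ((stop - 1 - f) / 4 + 1) * f + 2 * ((stop - 1 - f) / 4 + 1) * (((stop - 1 - f) / 4 + 1) - 1)

theorem alt_eq_altAux (start stop : Int) :
    sum_special_alt start stop = altAux (start + (3 - start) % 4) stop := by
  simp [sum_special_alt, altAux]

-- peel one element off the front of the closed form
theorem alt_step (marker stop : Int) (h : marker < stop) :
    sum_special_alt marker stop
      = (if marker % 4 = 3 then marker else 0) + sum_special_alt (marker + 1) stop := by
  rw [alt_eq_altAux, alt_eq_altAux]
  by_cases hm : marker % 4 = 3
  · have hf1 : marker + (3 - marker) % 4 = marker := by omega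
    have hf2 : marker + 1 + (3 - (marker + 1)) % 4 = marker + 4 := by omega
    rw [hf1, hf2, if_pos hm]
    unfold altAux
    rw [if_neg (by omega)]
    by_cases hs : marker + 4 ≥ stop
    · rw [if_pos hs]
      have hn : (stop - 1 - marker) / 4 = 0 := by omega
      rw [hn]; ring
    · rw [if_neg hs]
      have hn : (stop - 1 - (marker + 4)) / 4 = (stop - 1 - marker) / 4 - 1 := by omega
      rw [hn]
      generalize (stop - 1 - marker) / 4 = q
      ring
  · have hf : marker + 1 + (3 - (marker + 1)) % 4 = marker + (3 - marker) % 4 := by omega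
    rw [hf, if_neg hm, zero_add]

theorem loop_eq (stop : Int) :
    ∀ (k : Nat) (marker suma : Int), (stop - marker).toNat ≤ k →
      sumSpecialLoop stop marker suma = suma + sum_special_alt marker stop := by
  intro k
  induction k with
  | zero =>
      intro marker suma hk
      have hge : ¬ marker < stop := by omega
      rw [sumSpecialLoop, if_neg hge, alt_eq_altAux, altAux, if_pos (by omega)]
      ring
  | succ k ih =>
      intro marker suma hk
      by_cases h : marker < stop
      · rw [sumSpecialLoop, if_pos h, ih (marker + 1) _ (by omega),
            alt_step marker stop h]
        by_cases hm : marker % 4 = 3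
        · rw [if_pos ((is_special_iff marker).mpr hm), if_pos hm]; ring
        · rw [if_neg (by simpa [is_special_iff] using hm), if_neg hm]; ring
      · rw [sumSpecialLoop, if_neg h, alt_eq_altAux, altAux, if_pos (by omega)]
        ring

-- ===== VERDICT (by name: the statement is the Claim_ definition above) =====
theorem sum_special_spec : Claim_equal_sum_special := by
  intro start stop _
  unfold Spec_sum_special sum_special
  rw [loop_eq stop (stop - start).toNat start 0 (le_refl _), zero_add]
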